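-- pv_equiv track=rewrite | github.com/Gritzpup/project-sanctuary | the-luminal-archive/quantum-memory/core/psychological/phase_detection.py | _contains_vulnerability_marker
-- ===== SOURCE A (Python) =====
-- def _contains_vulnerability_marker(content: str) -> bool:
--     """Detect vulnerability and trust markers in content"""
--     vulnerability_phrases = [
--         'afraid', 'scared', 'worry', 'concern', 'struggle',
--         'hard for me', 'difficult to say', 'never told',
--         'trust you', 'confession', 'honest', 'vulnerable'
--     ]
--
--     content_lower = content.lower()
--     return any(phrase in content_lower for phrase in vulnerability_phrases)
-- ===== SOURCE B (Python) =====
-- def _contains_vulnerability_marker(content: str) -> bool: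
--     """Detect vulnerability and trust markers in content"""
--     vulnerability_phrases = [
--         'afraid', 'scared', 'worry', 'concern', 'struggle',
--         'hard for me', 'difficult to say', 'never told',
--         'trust you', 'confession', 'honest', 'vulnerable'
--     ]
--     s = content.lower()
--     while s:
--         if any(s.startswith(p) for p in vulnerability_phrases):
--             return True
--         s = s[1:]
--     return False
-- ===== Notes on version B (the rewrite author's own statement) =====
-- stated objective: alternative
-- what changed: A runs k independent whole-text substring searches, one per phrase; B makes a single left-to-right scan over the lowered text, testing at each position whether any phrase starts there via startswith, so the loop structure is position-outer/phrase-inner instead of phrase-outer.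
import Mathlib
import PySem

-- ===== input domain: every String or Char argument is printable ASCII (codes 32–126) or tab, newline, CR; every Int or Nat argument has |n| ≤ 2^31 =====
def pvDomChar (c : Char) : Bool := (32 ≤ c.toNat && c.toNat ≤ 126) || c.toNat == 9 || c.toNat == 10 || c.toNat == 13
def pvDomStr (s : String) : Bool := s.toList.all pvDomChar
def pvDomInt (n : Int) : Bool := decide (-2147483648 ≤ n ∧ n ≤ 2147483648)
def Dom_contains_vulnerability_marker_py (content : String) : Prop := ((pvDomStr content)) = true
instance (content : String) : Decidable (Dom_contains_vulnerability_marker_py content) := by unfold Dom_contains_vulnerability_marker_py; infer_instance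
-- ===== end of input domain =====

-- B replaces A's k whole-text substring searches by one left-to-right positional scan testing phrase prefixes (alternative decomposition, same behaviour).

-- ===== PORT A =====
def pvPhrasesA : List String :=
  ["afraid", "scared", "worry", "concern", "struggle",
   "hard for me", "difficult to say", "never told",
   "trust you", "confession", "honest", "vulnerable"]

def contains_vulnerability_marker_py (content : String) : Bool :=
  let content_lower := PySem.Str.lower content
  pvPhrasesA.any (fun phrase => PySem.Str.isIn phrase content_lower)

-- ===== PORT B =====
def pvPhrasesB : List String :=
  ["afraid", "scared", "worry", "concern", "struggle",
   "hard for me", "difficult to say", "never told",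
   "trust you", "confession", "honest", "vulnerable"]

-- the 'while s: … s = s[1:]' loop of Source B, as structural recursion on the char list
def pvScan (cs : List Char) : Bool :=
  match cs with
  | [] => false
  | _ :: rest =>
    if pvPhrasesB.any (fun p => PySem.Chars.startswith cs p.toList) then true
    else pvScan rest

def contains_vulnerability_marker_py_alt (content : String) : Bool :=
  pvScan (PySem.Str.lower content).toList

-- ===== PRECONDITION & SPEC =====
def Spec_contains_vulnerability_marker_py (content : String) (out : Bool) : Prop := out = contains_vulnerability_marker_py_alt content
instance (content : String) (out : Bool) : Decidable (Spec_contains_vulnerability_marker_py content out) := by unfold Spec_contains_vulnerability_marker_py; infer_instance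

-- ===== CLAIM (what is proved, stated in full; the proofs are below) =====
def Claim_equal_contains_vulnerability_marker_py : Prop := ∀ (content : String), Dom_contains_vulnerability_marker_py content → Spec_contains_vulnerability_marker_py content (contains_vulnerability_marker_py content)

-- ===== LEMMAS AND PROOFS =====

theorem pvPhrasesB_ne_nil : ∀ p ∈ pvPhrasesB, p.toList ≠ [] := by decide

-- the scan finds exactly the phrases that occur as a prefix of some suffix
theorem pvScan_iff (cs : List Char) :
    pvScan cs = true ↔ ∃ p ∈ pvPhrasesB, ∃ j, p.toList <+: cs.drop j := by
  induction cs with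
  | nil =>
    simp only [pvScan, List.drop_nil]
    constructor
    · intro h; exact absurd h (by decide)
    · rintro ⟨p, hp, j, hpre⟩
      exact absurd (List.prefix_nil.mp hpre) (pvPhrasesB_ne_nil p hp)
  | cons c rest ih =>
    simp only [pvScan]
    split_ifs with h
    · simp only [true_iff]
      obtain ⟨p, hp, hsw⟩ := List.any_eq_true.mp h
      exact ⟨p, hp, 0, by simpa using (PySem.Chars.startswith_iff (c :: rest) p.toList).mp hsw⟩
    · rw [ih]
      have hno : ∀ p ∈ pvPhrasesB, ¬ p.toList <+: (c :: rest) := by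
        intro p hp hpre
        apply h
        exact List.any_eq_true.mpr ⟨p, hp, (PySem.Chars.startswith_iff (c :: rest) p.toList).mpr hpre⟩
      constructor
      · rintro ⟨p, hp, j, hpre⟩; exact ⟨p, hp, j + 1, by simpa using hpre⟩
      · rintro ⟨p, hp, j, hpre⟩
        cases j with
        | zero => exact absurd (by simpa using hpre) (hno p hp)
        | succ k => exact ⟨p, hp, k, by simpa using hpre⟩

-- ===== VERDICT (by name: the statement is the Claim_ definition above) =====
theorem contains_vulnerability_marker_py_spec : Claim_equal_contains_vulnerability_marker_py := by
  intro content _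
  unfold Spec_contains_vulnerability_marker_py
  unfold contains_vulnerability_marker_py contains_vulnerability_marker_py_alt
  apply Bool.eq_iff_iff.mpr
  rw [pvScan_iff]
  constructor
  · intro h
    obtain ⟨p, hp, hin⟩ := List.any_eq_true.mp h
    refine ⟨p, hp, ?_⟩
    have := (PySem.Str.isIn_iff_infix p (PySem.Str.lower content)).mp hin
    exact (PySem.Chars.exists_prefix_drop_iff_isIn p.toList (PySem.Str.lower content).toList).mpr
      ((PySem.Chars.isIn_iff_infix _ _).mpr this)
  · rintro ⟨p, hp, hex⟩
    apply List.any_eq_true.mpr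
    refine ⟨p, hp, ?_⟩
    have := (PySem.Chars.exists_prefix_drop_iff_isIn p.toList (PySem.Str.lower content).toList).mp hex
    exact (PySem.Str.isIn_iff_infix p (PySem.Str.lower content)).mpr
      ((PySem.Chars.isIn_iff_infix _ _).mp this)
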